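-- pv_equiv track=rewrite | github.com/Nicolas-Thomazo/Advent-Of-Code | 2025/day10/part1.py | implement_bfs
-- ===== SOURCE A (Python) =====
-- from collections import deque
--
-- def apply_xor(curent_joltage: int, pressed_button: int) -> int:
--     """
--     Apply joltage with XOR operation
--
--     Args:
--     curent_joltage (list[int]): current joltage
--     pressed_button (tuple): button to press
--
--     Returns:
--     list[int]: updated joltage
--     """
--     new_joltage: int = curent_joltage ^ pressed_button
--     return new_joltage
--
-- def implement_bfs(buttons: list[int], joltage: int) -> int:
--     """
--     Implement BFS to find the minimum number of button presses to reach the expected joltage.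
--     We start from the initial joltage (0) and we apply the buttons one by one, until we reach the expected joltage.
--     We keep track of the visited joltages to avoid infinite loops.
--
--     Args:
--         buttons (list[int]): list of buttons to press, where each button is represented by an integer that corresponds to a combination of LEDs that will be toggled when the button is pressed.
--         joltage (int): expected joltage that we want to reach, represented by an integer that corresponds to a binary number, where 1 corresponds to a lit LED and 0 corresponds to an unlit LED.
--
--     Returns:
--         int: the minimum number of button presses to reach the expected joltage.
--     """
--     init_joltage = 0
--     steps = 0
--     queue = deque([(init_joltage, steps)])
--     visited = set()
--     solution = False
--     while queue and not solution:
--         current_joltage, current_steps = queue.popleft()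
--         current_steps += 1
--         for button in buttons:
--             new_joltage = apply_xor(current_joltage, button)
--             if new_joltage == joltage:
--                 solution = True
--                 break
--             if new_joltage not in visited:
--                 visited.add(new_joltage)
--                 queue.append((new_joltage, current_steps))
--     assert solution, "A solution should have been found"
--     return current_steps
-- ===== SOURCE B (Python) =====
-- def implement_bfs(buttons: list[int], joltage: int) -> int:
--     """Level-synchronous BFS: generate each whole next layer of joltages at once,
--     test the target against the layer with one membership check, then keep only
--     the not-yet-visited states as the next frontier."""
--     frontier = [0]
--     visited = set()
--     depth = 1
--     while frontier:
--         layer = [state ^ button for state in frontier for button in buttons]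
--         if joltage in layer:
--             return depth
--         fresh = []
--         for state in layer:
--             if state not in visited:
--                 visited.add(state)
--                 fresh.append(state)
--         frontier = fresh
--         depth += 1
--     raise AssertionError("A solution should have been found")
-- ===== Notes on version B (the rewrite author's own statement) =====
-- stated objective: alternative
-- what changed: A runs BFS with a FIFO deque of (state, steps) pairs popped one node at a time, testing and pruning each neighbour as it is generated; B runs level-synchronous BFS: it generates the whole next layer with one comprehension, tests the target with a single membership check per layer, then keeps the unvisited states in a separate filter pass, tracking depth with one counter instead of per-node step fields — trading A's mid-level early exit for at most one extra full layer of generation work.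
import Mathlib
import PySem

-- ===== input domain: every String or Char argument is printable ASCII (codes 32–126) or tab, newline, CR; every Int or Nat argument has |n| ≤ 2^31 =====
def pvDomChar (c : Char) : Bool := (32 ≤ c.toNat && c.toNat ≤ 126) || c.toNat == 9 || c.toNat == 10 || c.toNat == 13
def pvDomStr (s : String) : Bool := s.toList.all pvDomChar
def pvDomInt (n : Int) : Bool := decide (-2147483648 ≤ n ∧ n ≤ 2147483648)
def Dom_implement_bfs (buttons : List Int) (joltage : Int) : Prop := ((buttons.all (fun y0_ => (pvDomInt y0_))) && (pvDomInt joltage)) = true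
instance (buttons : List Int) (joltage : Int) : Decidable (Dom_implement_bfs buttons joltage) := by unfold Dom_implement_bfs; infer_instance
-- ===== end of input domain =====

-- B re-implements A's node-at-a-time queue BFS as a level-synchronous BFS (whole next layer
-- generated at once, one membership test per layer, separate filter pass); objective: alternative.

-- ===== PORT A =====
-- helper apply_xor
def apply_xor (curent_joltage pressed_button : Int) : Int :=
  PySem.Int.bxor curent_joltage pressed_button

-- termination fuel for A's while-loop (a totality guard only: twice the size of a finite
-- superset of the visitable joltages, plus slack)
def pvFuelA (buttons : List Int) : Nat :=
  2 * (buttons.foldl (fun S b => S ∪ S.image (fun x => PySem.Int.bxor x b)) ({0} : Finset Int)).card + 2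

-- A's inner `for button in buttons` loop; `none` = `solution = True` (the break)
def pvAButtons (joltage s steps : Int) :
    List Int → List (Int × Int) → PySem.Set Int → Option (List (Int × Int) × PySem.Set Int)
  | [], queue, visited => some (queue, visited)
  | b :: bs, queue, visited =>
    let new_joltage := apply_xor s b
    if new_joltage = joltage then none
    else if new_joltage ∈ visited then pvAButtons joltage s steps bs queue visited
    else pvAButtons joltage s steps bs (queue ++ [(new_joltage, steps)]) (PySem.Set.add visited new_joltage)

-- A's while-loop (fuel is a termination guard only); `some none` = queue drained, assert fails
def pvALoop (buttons : List Int) (joltage : Int) :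
    Nat → List (Int × Int) → PySem.Set Int → Option (Option Int)
  | _, [], _ => some none
  | 0, _ :: _, _ => none
  | fuel + 1, (s, d) :: queue, visited =>
    match pvAButtons joltage s (d + 1) buttons queue visited with
    | none => some (some (d + 1))
    | some (queue', visited') => pvALoop buttons joltage fuel queue' visited'

def implement_bfs (buttons : List Int) (joltage : Int) : Int :=
  match pvALoop buttons joltage (pvFuelA buttons) [(0, 0)] PySem.Set.empty with
  | some (some r) => r
  | _ => 0   -- AssertionError (queue drained) or fuel exhausted: outside Pre_

-- ===== PORT B =====
-- termination fuel for Source B's while-loop (a totality guard only)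
def pvFuelB (buttons : List Int) : Nat :=
  2 * (buttons.foldl (fun S b => S ∪ S.image (fun x => PySem.Int.bxor x b)) ({0} : Finset Int)).card + 4

-- the `for state in layer` filter pass of Source B
def pvBFresh (layer : List Int) (visited : PySem.Set Int) : List Int × PySem.Set Int :=
  layer.foldl (fun p t => if t ∈ p.2 then p else (p.1 ++ [t], PySem.Set.add p.2 t)) ([], visited)

-- Source B's while-loop (fuel is a termination guard only); `some none` = frontier empty, raise
def pvBLoop (buttons : List Int) (joltage : Int) :
    Nat → List Int → PySem.Set Int → Int → Option (Option Int)
  | _, [], _, _ => some none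
  | 0, _ :: _, _, _ => none
  | fuel + 1, s :: frontier, visited, depth =>
    let layer := (s :: frontier).flatMap (fun st => buttons.map (fun b => PySem.Int.bxor st b))
    if joltage ∈ layer then some (some depth)
    else
      let p := pvBFresh layer visited
      pvBLoop buttons joltage fuel p.1 p.2 (depth + 1)

def implement_bfs_alt (buttons : List Int) (joltage : Int) : Int :=
  match pvBLoop buttons joltage (pvFuelB buttons) [0] PySem.Set.empty 1 with
  | some (some r) => r
  | some none => 0   -- AssertionError (frontier empty): outside Pre_
  | none => 0        -- fuel exhausted: outside Pre_

-- ===== PRECONDITION & SPEC =====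
-- the set of joltages XOR-reachable from 0 (all subset-XORs of the buttons)
def pvXorSpan (buttons : List Int) : Finset Int :=
  buttons.foldl (fun S b => S ∪ S.image (fun x => PySem.Int.bxor x b)) {0}

-- Pre_ excludes exactly the inputs where Python A raises AssertionError (no button at all, or the
-- target joltage not XOR-reachable from 0); A returns normally on every other input.
def Pre_implement_bfs (buttons : List Int) (joltage : Int) : Prop :=
  buttons ≠ [] ∧ joltage ∈ pvXorSpan buttons
instance (buttons : List Int) (joltage : Int) : Decidable (Pre_implement_bfs buttons joltage) := by
  unfold Pre_implement_bfs; infer_instance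

def pvWitness_implement_bfs : List Int × Int := ([1], 1)

def Spec_implement_bfs (buttons : List Int) (joltage : Int) (out : Int) : Prop := out = implement_bfs_alt buttons joltage
instance (buttons : List Int) (joltage : Int) (out : Int) : Decidable (Spec_implement_bfs buttons joltage out) := by unfold Spec_implement_bfs; infer_instance

-- ===== CLAIM (what is proved, stated in full; the proofs are below) =====
def Claim_equal_implement_bfs : Prop := ∀ (buttons : List Int) (joltage : Int), Dom_implement_bfs buttons joltage → Pre_implement_bfs buttons joltage → Spec_implement_bfs buttons joltage (implement_bfs buttons joltage)

-- ===== LEMMAS AND PROOFS =====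

-- Python ^ is an involution: (x ^ b) ^ b = x
theorem pvToNat_negneg (n : Nat) : (-(-(n : Int) - 1) - 1).toNat = n := by omega

theorem pvNatXor_right_comm (a b c : Nat) : a ^^^ b ^^^ c = a ^^^ c ^^^ b := by
  rw [Nat.xor_assoc, Nat.xor_comm b c, ← Nat.xor_assoc]

set_option maxHeartbeats 1000000 in
theorem pvBxor_cancel (x b : Int) :
    PySem.Int.bxor (PySem.Int.bxor x b) b = x := by
  unfold PySem.Int.bxor
  split_ifs <;>
    first
      | omega
      | (simp only [pvToNat_negneg, Int.toNat_natCast, Nat.xor_xor_cancel_right]; omega)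

-- presses of two different buttons commute: (x ^ b) ^ c = (x ^ c) ^ b
theorem pvBxor_right_comm (x b c : Int) :
    PySem.Int.bxor (PySem.Int.bxor x b) c = PySem.Int.bxor (PySem.Int.bxor x c) b := by
  unfold PySem.Int.bxor
  split_ifs <;>
    first
      | omega
      | (simp only [pvToNat_negneg, Int.toNat_natCast, pvNatXor_right_comm]; try omega)

theorem pvFuelA_eq (buttons : List Int) : pvFuelA buttons = 2 * (pvXorSpan buttons).card + 2 := rfl

theorem pvFuelB_eq (buttons : List Int) : pvFuelB buttons = 2 * (pvXorSpan buttons).card + 4 := rfl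

-- the list of joltages generated by expanding the states of L in order
def pvGen (buttons : List Int) (L : List Int) : List Int :=
  L.flatMap (fun s => buttons.map (fun b => PySem.Int.bxor s b))

-- common middle form of one BFS layer pass: scan the generated joltages, `none` = target hit,
-- otherwise collect the fresh ones in order while growing visited
def pvCollect (joltage : Int) : List Int → PySem.Set Int → Option (List Int × PySem.Set Int)
  | [], visited => some ([], visited)
  | t :: ts, visited =>
    if t = joltage then none
    else if t ∈ visited then pvCollect joltage ts visited
    else
      match pvCollect joltage ts (PySem.Set.add visited t) with
      | none => none
      | some (ns, v) => some (t :: ns, v)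

theorem pvCollect_append (joltage : Int) (xs ys : List Int) (vis : PySem.Set Int) :
    pvCollect joltage (xs ++ ys) vis =
      match pvCollect joltage xs vis with
      | none => none
      | some (ns, v) =>
        match pvCollect joltage ys v with
        | none => none
        | some (ms, w) => some (ns ++ ms, w) := by
  induction xs generalizing vis with
  | nil =>
    simp only [List.nil_append, pvCollect]
    cases hc : pvCollect joltage ys vis with
    | none => simp
    | some p => simp
  | cons t xs ih =>
    simp only [List.cons_append, pvCollect]
    split_ifs with h1 h2
    · rfl
    · exact ih vis
    · rw [ih]
      cases hc : pvCollect joltage xs (PySem.Set.add vis t) with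
      | none => simp
      | some p =>
        obtain ⟨ns, v⟩ := p
        cases hc2 : pvCollect joltage ys v with
        | none => simp [hc2]
        | some q => simp [hc2]

-- A's inner button loop is the collect pass over the generated joltages of one state
theorem pvAButtons_eq_collect (joltage s d : Int) (bs : List Int) (q : List (Int × Int))
    (vis : PySem.Set Int) :
    pvAButtons joltage s d bs q vis =
      match pvCollect joltage (bs.map (fun b => PySem.Int.bxor s b)) vis with
      | none => none
      | some (ns, v) => some (q ++ ns.map (fun t => (t, d)), v) := by
  induction bs generalizing q vis with
  | nil => simp [pvAButtons, pvCollect]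
  | cons b bs ih =>
    simp only [pvAButtons, List.map_cons, pvCollect, apply_xor]
    split_ifs with h1 h2
    · rfl
    · exact ih q vis
    · rw [ih]
      cases hc : pvCollect joltage (bs.map fun b => PySem.Int.bxor s b)
          (PySem.Set.add vis (PySem.Int.bxor s b)) with
      | none => simp
      | some p => obtain ⟨ns, v⟩ := p; simp

-- B's one-shot membership test agrees with collect's hit condition
theorem pvCollect_eq_none_iff (joltage : Int) (ts : List Int) (vis : PySem.Set Int) :
    pvCollect joltage ts vis = none ↔ joltage ∈ ts := by
  induction ts generalizing vis with
  | nil => simp [pvCollect]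
  | cons t ts ih =>
    simp only [pvCollect]
    split_ifs with h1 h2
    · subst h1; simp
    · rw [ih]
      simp only [List.mem_cons]
      constructor
      · exact fun h => Or.inr h
      · rintro (rfl | h)
        · exact absurd rfl h1
        · exact h
    · cases hc : pvCollect joltage ts (PySem.Set.add vis t) with
      | none =>
        have := (ih (PySem.Set.add vis t)).mp hc
        simp [this]
      | some p =>
        have hnot : joltage ∉ ts := fun hmem => by
          rw [(ih (PySem.Set.add vis t)).mpr hmem] at hc; cases hc
        simp only [List.mem_cons]
        constructor
        · intro h; cases h
        · rintro (rfl | h)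
          · exact absurd rfl h1
          · exact absurd h hnot

-- B's separate filter pass computes collect's fresh list and visited set
theorem pvBFresh_eq_collect (joltage : Int) (ts : List Int) (vis : PySem.Set Int)
    (ns : List Int) (v : PySem.Set Int) (h : pvCollect joltage ts vis = some (ns, v)) :
    ∀ acc : List Int,
      ts.foldl (fun p t => if t ∈ p.2 then p else (p.1 ++ [t], PySem.Set.add p.2 t)) (acc, vis)
        = (acc ++ ns, v) := by
  induction ts generalizing vis ns v with
  | nil =>
    simp only [pvCollect, Option.some.injEq, Prod.mk.injEq] at h
    obtain ⟨rfl, rfl⟩ := h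
    intro acc; simp
  | cons t ts ih =>
    intro acc
    simp only [pvCollect] at h
    split_ifs at h with h1 h2
    · simp only [List.foldl_cons, if_pos h2]
      exact ih _ _ _ h acc
    · cases hc : pvCollect joltage ts (PySem.Set.add vis t) with
      | none => rw [hc] at h; cases h
      | some p =>
        obtain ⟨ns', v'⟩ := p
        rw [hc] at h
        simp only [Option.some.injEq, Prod.mk.injEq] at h
        obtain ⟨rfl, rfl⟩ := h
        simp only [List.foldl_cons, if_neg h2]
        rw [ih _ _ _ hc (acc ++ [t])]
        simp

-- bookkeeping facts about collect, used for the fuel bound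
theorem pvCollect_props (joltage : Int) (ts : List Int) (vis : PySem.Set Int)
    (ns : List Int) (v : PySem.Set Int) (h : pvCollect joltage ts vis = some (ns, v)) :
    v = vis ++ ns ∧ (∀ t ∈ ns, t ∈ ts) ∧ (vis.Nodup → v.Nodup) := by
  induction ts generalizing vis ns v with
  | nil =>
    simp only [pvCollect, Option.some.injEq, Prod.mk.injEq] at h
    obtain ⟨rfl, rfl⟩ := h
    simp
  | cons t ts ih =>
    simp only [pvCollect] at h
    split_ifs at h with h1 h2
    · obtain ⟨hv, hmem, hnd⟩ := ih _ _ _ h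
      exact ⟨hv, fun u hu => List.mem_cons_of_mem _ (hmem u hu), hnd⟩
    · cases hc : pvCollect joltage ts (PySem.Set.add vis t) with
      | none => rw [hc] at h; cases h
      | some p =>
        obtain ⟨ns', v'⟩ := p
        rw [hc] at h
        simp only [Option.some.injEq, Prod.mk.injEq] at h
        obtain ⟨rfl, rfl⟩ := h
        obtain ⟨hv, hmem, hnd⟩ := ih _ _ _ hc
        rw [PySem.Set.add_of_not_mem h2] at hv
        refine ⟨by simp [hv], ?_, ?_⟩
        · intro u hu
          rcases List.mem_cons.mp hu with rfl | hu
          · exact List.mem_cons_self ..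
          · exact List.mem_cons_of_mem _ (hmem u hu)
        · intro hvis
          exact hnd (PySem.Set.nodup_add vis t hvis)

-- pvXorSpan facts -------------------------------------------------------------

theorem pvFoldl_subset (bs : List Int) :
    ∀ S : Finset Int,
      S ⊆ bs.foldl (fun S b => S ∪ S.image (fun x => PySem.Int.bxor x b)) S := by
  induction bs with
  | nil => intro S; exact Finset.Subset.refl S
  | cons b bs ih =>
    intro S
    simp only [List.foldl_cons]
    exact Finset.Subset.trans Finset.subset_union_left (ih _)

theorem pvFoldl_pres (c : Int) (bs : List Int) :
    ∀ S : Finset Int, (∀ x ∈ S, PySem.Int.bxor x c ∈ S) →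
      ∀ x ∈ bs.foldl (fun S b => S ∪ S.image (fun x => PySem.Int.bxor x b)) S,
        PySem.Int.bxor x c ∈ bs.foldl (fun S b => S ∪ S.image (fun x => PySem.Int.bxor x b)) S := by
  induction bs with
  | nil => intro S h; exact h
  | cons b bs ih =>
    intro S h
    simp only [List.foldl_cons]
    apply ih
    intro x hx
    rcases Finset.mem_union.mp hx with hx | hx
    · exact Finset.mem_union_left _ (h x hx)
    · obtain ⟨y, hy, rfl⟩ := Finset.mem_image.mp hx
      rw [pvBxor_right_comm]
      exact Finset.mem_union_right _ (Finset.mem_image_of_mem _ (h y hy))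

theorem pvFoldl_closed (bs : List Int) :
    ∀ (S : Finset Int) (b : Int), b ∈ bs →
      ∀ x ∈ bs.foldl (fun S b => S ∪ S.image (fun x => PySem.Int.bxor x b)) S,
        PySem.Int.bxor x b ∈ bs.foldl (fun S b => S ∪ S.image (fun x => PySem.Int.bxor x b)) S := by
  induction bs with
  | nil => intro S b hb; cases hb
  | cons c bs ih =>
    intro S b hb x hx
    simp only [List.foldl_cons] at hx ⊢
    rcases List.mem_cons.mp hb with rfl | hb
    · apply pvFoldl_pres
      · intro y hy
        rcases Finset.mem_union.mp hy with hy | hy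
        · exact Finset.mem_union_right _ (Finset.mem_image_of_mem _ hy)
        · obtain ⟨z, hz, rfl⟩ := Finset.mem_image.mp hy
          rw [pvBxor_cancel]
          exact Finset.mem_union_left _ hz
      · exact hx
    · exact ih _ b hb x hx

theorem pvXorSpan_zero_mem (buttons : List Int) : (0 : Int) ∈ pvXorSpan buttons := by
  exact pvFoldl_subset buttons {0} (Finset.mem_singleton_self 0)

theorem pvXorSpan_closed (buttons : List Int) (b : Int) (hb : b ∈ buttons) :
    ∀ x ∈ pvXorSpan buttons, PySem.Int.bxor x b ∈ pvXorSpan buttons := by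
  exact pvFoldl_closed buttons {0} b hb

-- simulation: A's queue loop, started mid-level, returns whatever Source B's loop returns ------------

theorem pvSim (buttons : List Int) (joltage : Int) :
    ∀ (n fa : Nat) (L acc : List Int) (vis : PySem.Set Int) (d : Int) (fb : Nat) (r : Option Int),
      2 * fa + (if L = [] then 1 else 0) ≤ n →
      fa + 1 + (if L = [] then 1 else 0) ≤ fb →
      pvALoop buttons joltage fa
          (L.map (fun s => (s, d)) ++ acc.map (fun t => (t, d + 1))) vis = some r →
      (match pvCollect joltage (pvGen buttons L) vis with
       | none => some (some (d + 1))
       | some (ns, v) => pvBLoop buttons joltage fb (acc ++ ns) v (d + 2)) = some r := by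
  intro n
  induction n with
  | zero =>
    intro fa L acc vis d fb r hb hf hA
    cases L with
    | nil => simp at hb
    | cons s L' =>
      have hfa : fa = 0 := by simp at hb; omega
      subst hfa
      simp [pvALoop] at hA
  | succ n ih =>
    intro fa L acc vis d fb r hb hf hA
    cases L with
    | cons s L' =>
      cases fa with
      | zero => simp [pvALoop] at hA
      | succ fa' =>
        simp only [List.map_cons, List.cons_append, pvALoop] at hA
        rw [pvAButtons_eq_collect] at hA
        have hgen : pvGen buttons (s :: L')
            = (buttons.map fun b => PySem.Int.bxor s b) ++ pvGen buttons L' := by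
          simp [pvGen]
        rw [hgen, pvCollect_append]
        cases hc1 : pvCollect joltage (buttons.map fun b => PySem.Int.bxor s b) vis with
        | none =>
          rw [hc1] at hA
          exact hA
        | some p1 =>
          obtain ⟨ns1, v1⟩ := p1
          rw [hc1] at hA
          have hA' : pvALoop buttons joltage fa'
              (L'.map (fun s => (s, d)) ++ (acc ++ ns1).map (fun t => (t, d + 1))) v1 = some r := by
            rw [List.map_append, ← List.append_assoc]
            exact hA
          have H := ih fa' L' (acc ++ ns1) v1 d fb r
            (by simp only [reduceCtorEq, if_false] at hb; split <;> omega)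
            (by simp only [reduceCtorEq, if_false] at hf; split <;> omega) hA'
          cases hc2 : pvCollect joltage (pvGen buttons L') v1 with
          | none => simpa [hc2] using H
          | some p2 =>
            obtain ⟨ns2, v2⟩ := p2
            simpa [hc2, List.append_assoc] using H
    | nil =>
      cases acc with
      | nil =>
        simp only [List.map_nil, List.nil_append, pvALoop] at hA
        simpa [pvGen, pvCollect, pvBLoop] using hA
      | cons a acc' =>
        obtain ⟨fb', rfl⟩ : ∃ fb', fb = fb' + 1 := ⟨fb - 1, by simp at hf; omega⟩
        simp only [pvGen, List.flatMap_nil, pvCollect, List.append_nil]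
        have hA' : pvALoop buttons joltage fa
            ((a :: acc').map (fun s => (s, d + 1))
              ++ ([] : List Int).map (fun t => (t, d + 1 + 1))) vis = some r := by
          simpa using hA
        have H := ih fa (a :: acc') [] vis (d + 1) fb' r
          (by simp at hb ⊢; omega) (by simp at hf ⊢; omega) hA'
        have hgen2 : ((a :: acc').flatMap fun st => buttons.map fun b => PySem.Int.bxor st b)
            = pvGen buttons (a :: acc') := rfl
        simp only [pvBLoop]
        rw [hgen2]
        cases hc : pvCollect joltage (pvGen buttons (a :: acc')) vis with
        | none =>
          rw [hc] at H
          have hj : joltage ∈ pvGen buttons (a :: acc') :=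
            (pvCollect_eq_none_iff joltage (pvGen buttons (a :: acc')) vis).mp hc
          rw [if_pos hj]
          rw [show d + 1 + 1 = d + 2 from by ring] at H
          simpa using H
        | some p =>
          obtain ⟨ns, v⟩ := p
          rw [hc] at H
          have H2 : pvBLoop buttons joltage fb' (([] : List Int) ++ ns) v (d + 1 + 2) = some r := by
            simpa using H
          have hj : ¬ joltage ∈ pvGen buttons (a :: acc') := by
            intro hmem
            rw [(pvCollect_eq_none_iff joltage (pvGen buttons (a :: acc')) vis).mpr hmem] at hc
            cases hc
          rw [if_neg hj]
          have hfold := pvBFresh_eq_collect joltage (pvGen buttons (a :: acc')) vis ns v hc []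
          have hp : pvBFresh (pvGen buttons (a :: acc')) vis = (ns, v) := by
            unfold pvBFresh
            exact hfold
          rw [hp]
          rw [show d + 2 + 1 = d + 1 + 2 from by ring]
          simpa using H2

-- fuel sufficiency for A's loop: it never runs out of fuel
theorem pvSuf (buttons : List Int) (joltage : Int) :
    ∀ (fuel : Nat) (Q : List (Int × Int)) (vis : PySem.Set Int),
      (∀ p ∈ Q, p.1 ∈ pvXorSpan buttons) → (∀ x ∈ vis, x ∈ pvXorSpan buttons) → vis.Nodup →
      Q.length + 2 * ((pvXorSpan buttons).card - vis.length) + 1 ≤ fuel →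
      pvALoop buttons joltage fuel Q vis ≠ none := by
  intro fuel
  induction fuel with
  | zero => intro Q vis _ _ _ hb; omega
  | succ fuel ih =>
    intro Q vis hQ hvis hnd hb
    cases Q with
    | nil => simp [pvALoop]
    | cons p Q' =>
      obtain ⟨s, d⟩ := p
      simp only [pvALoop]
      rw [pvAButtons_eq_collect]
      cases hc : pvCollect joltage (buttons.map fun b => PySem.Int.bxor s b) vis with
      | none => simp
      | some pr =>
        obtain ⟨ns, v⟩ := pr
        simp only
        have hs : s ∈ pvXorSpan buttons := hQ (s, d) (List.mem_cons_self ..)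
        obtain ⟨hv, hmem, hnd'⟩ := pvCollect_props joltage _ vis ns v hc
        have hnsSpan : ∀ t ∈ ns, t ∈ pvXorSpan buttons := by
          intro t ht
          obtain ⟨b, hb', rfl⟩ := List.mem_map.mp (hmem t ht)
          exact pvXorSpan_closed buttons b hb' s hs
        have hvSpan : ∀ x ∈ v, x ∈ pvXorSpan buttons := by
          intro x hx
          rw [hv] at hx
          rcases List.mem_append.mp hx with hx | hx
          · exact hvis x hx
          · exact hnsSpan x hx
        have hvnd : v.Nodup := hnd' hnd
        have hlen : v.length ≤ (pvXorSpan buttons).card := by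
          calc v.length = v.toFinset.card := (List.toFinset_card_of_nodup hvnd).symm
            _ ≤ (pvXorSpan buttons).card :=
              Finset.card_le_card (fun x hx => hvSpan x (List.mem_toFinset.mp hx))
        apply ih
        · intro p hp
          rcases List.mem_append.mp hp with hp | hp
          · exact hQ p (List.mem_cons_of_mem _ hp)
          · obtain ⟨t, ht, rfl⟩ := List.mem_map.mp hp
            exact hnsSpan t ht
        · exact hvSpan
        · exact hvnd
        · have hvlen : v.length = vis.length + ns.length := by rw [hv]; simp
          have hql : (Q' ++ ns.map fun t => (t, d + 1)).length = Q'.length + ns.length := by simp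
          simp only [List.length_cons] at hb
          omega

theorem pvTop (buttons : List Int) (joltage : Int) (r : Option Int)
    (hA : pvALoop buttons joltage (pvFuelA buttons) [(0, 0)] PySem.Set.empty = some r) :
    pvBLoop buttons joltage (pvFuelB buttons) [0] PySem.Set.empty 1 = some r := by
  rw [pvFuelA_eq] at hA
  rw [pvFuelB_eq]
  have hA' : pvALoop buttons joltage (2 * (pvXorSpan buttons).card + 2)
      (([0] : List Int).map (fun s => (s, 0)) ++ ([] : List Int).map (fun t => (t, 0 + 1)))
      PySem.Set.empty = some r := by simpa using hA
  have H := pvSim buttons joltage (2 * (2 * (pvXorSpan buttons).card + 2))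
    (2 * (pvXorSpan buttons).card + 2) [0] [] PySem.Set.empty 0
    (2 * (pvXorSpan buttons).card + 3) r (by simp) (by simp) hA'
  obtain ⟨f, hf⟩ : ∃ f, 2 * (pvXorSpan buttons).card + 4 = f + 1 :=
    ⟨2 * (pvXorSpan buttons).card + 3, by ring⟩
  rw [hf]
  have hgen2 : (([0] : List Int).flatMap fun st => buttons.map fun b => PySem.Int.bxor st b)
      = pvGen buttons [0] := rfl
  have hfb : f = 2 * (pvXorSpan buttons).card + 3 := by omega
  subst hfb
  simp only [pvBLoop]
  rw [hgen2]
  cases hc : pvCollect joltage (pvGen buttons [0]) PySem.Set.empty with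
  | none =>
    rw [hc] at H
    have hj : joltage ∈ pvGen buttons [0] :=
      (pvCollect_eq_none_iff joltage (pvGen buttons [0]) PySem.Set.empty).mp hc
    rw [if_pos hj]
    simpa using H
  | some p =>
    obtain ⟨ns, v⟩ := p
    rw [hc] at H
    have hj : ¬ joltage ∈ pvGen buttons [0] := by
      intro hmem
      rw [(pvCollect_eq_none_iff joltage (pvGen buttons [0]) PySem.Set.empty).mpr hmem] at hc
      cases hc
    rw [if_neg hj]
    have hfold := pvBFresh_eq_collect joltage (pvGen buttons [0]) PySem.Set.empty ns v hc []
    have hp : pvBFresh (pvGen buttons [0]) PySem.Set.empty = (ns, v) := by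
      unfold pvBFresh
      exact hfold
    rw [hp]
    simpa using H

-- ===== VERDICT (by name: the statement is the Claim_ definition above) =====
theorem implement_bfs_spec : Claim_equal_implement_bfs := by
  intro buttons joltage _ _
  unfold Spec_implement_bfs implement_bfs implement_bfs_alt
  rw [show pvFuelA buttons = 2 * (pvXorSpan buttons).card + 2 from rfl,
     show pvFuelB buttons = 2 * (pvXorSpan buttons).card + 4 from rfl]
  cases hA : pvALoop buttons joltage (2 * (pvXorSpan buttons).card + 2) [(0, 0)] PySem.Set.empty with
  | none =>
    exact absurd hA (pvSuf buttons joltage _ _ _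
      (by intro p hp; simp at hp; simp [hp, pvXorSpan_zero_mem]) (by simp [PySem.Set.empty])
      (by simp [PySem.Set.empty]) (by simp [PySem.Set.empty]; omega))
  | some r =>
    rw [← pvFuelA_eq buttons] at hA
    rw [← pvFuelB_eq buttons, pvTop buttons joltage r hA]
    cases r with
    | none => rfl
    | some k => rfl
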